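-- pv_equiv track=rewrite | github.com/SymmetricChaos/NumberTheory | Sequences/MathUtils.py | repeating_part
-- ===== SOURCE A (Python) =====
-- def repeating_part(n,d,B=10):
--     """
--     Repeating part of the fraction n/d in base B
--     Returns a list
--     """
--
--     # Get rid of the integer part
--     if n > d:
--         n = n%d*B
--
--     digits = []
--     remainders = []
--
--     while n not in remainders:
--         remainders.append(n)
--         q,r = divmod(n,d)
--         digits.append(q)
--         n = r*B
--
--     for p,rem in enumerate(remainders):
--         if rem == n:
--             break
--
--     return digits[p:]
-- ===== SOURCE B (Python) =====
-- def repeating_part(n, d, B=10):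
--     """
--     Repeating part of the fraction n/d in base B.
--     Floyd tortoise-and-hare cycle detection on the remainder sequence
--     x -> x % d * B: no list/dict of seen remainders is kept (O(1) extra space);
--     once the cycle start is found, one full cycle of digits is emitted.
--     """
--     if n > d:
--         n = n % d * B
--
--     def step(x):
--         return x % d * B
--
--     # Phase 1: meeting point of tortoise and hare inside the cycle
--     slow, fast = step(n), step(step(n))
--     while slow != fast:
--         slow = step(slow)
--         fast = step(step(fast))
--
--     # Phase 2: the first repeated remainder (start of the cycle)
--     start = n
--     while start != slow:
--         start = step(start)
--         slow = step(slow)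
--
--     # Phase 3: emit one full cycle of digits
--     digits = [start // d]
--     r = step(start)
--     while r != start:
--         digits.append(r // d)
--         r = step(r)
--     return digits
-- ===== Notes on version B (the rewrite author's own statement) =====
-- stated objective: faster
-- what changed: replaces A's stored remainder list with its O(k) membership scan per step and final enumerate pass by Floyd's tortoise-and-hare cycle detection on the remainder map x -> x%d*B: no seen-remainder collection at all, O(1) extra space, then one full cycle of digits is emitted from the cycle start
import Mathlib
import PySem

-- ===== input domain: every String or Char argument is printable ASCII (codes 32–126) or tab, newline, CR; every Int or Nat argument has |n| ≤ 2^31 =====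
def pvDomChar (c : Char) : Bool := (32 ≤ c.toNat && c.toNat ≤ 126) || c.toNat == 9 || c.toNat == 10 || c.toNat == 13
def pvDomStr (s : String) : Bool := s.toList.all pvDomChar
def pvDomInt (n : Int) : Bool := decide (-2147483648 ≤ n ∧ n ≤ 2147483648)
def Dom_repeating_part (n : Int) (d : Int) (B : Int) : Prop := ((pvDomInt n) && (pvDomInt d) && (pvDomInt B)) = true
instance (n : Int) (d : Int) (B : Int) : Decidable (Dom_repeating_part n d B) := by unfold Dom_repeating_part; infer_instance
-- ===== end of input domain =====

-- B replaces A's stored remainder list (O(k) membership scan per step + final enumerate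
-- pass) by Floyd's tortoise-and-hare cycle detection on x ↦ x % d * B: no seen-remainder
-- collection, O(1) extra space; one full cycle of digits is emitted from the cycle start.


-- ===== PORT A =====
-- A's while loop, hand-ported with fuel d.natAbs + 2 (provably enough: the first repeated
-- remainder occurs within d.natAbs + 1 steps); fuel 0 is unreachable.
def repeating_part_loop (d B : Int) (fuel : Nat) (n : Int) (digits remainders : List Int) : List Int :=
  match fuel with
  | 0 => []
  | fuel + 1 =>
    if remainders.contains n then
      -- for p, rem in enumerate(remainders): if rem == n: break  → first index of n
      let p := (PySem.List.index? remainders n).getD 0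
      digits.drop p          -- digits[p:]
    else
      let q := PySem.Int.floordiv n d
      let r := PySem.Int.mod n d
      repeating_part_loop d B fuel (r * B) (digits ++ [q]) (remainders ++ [n])

def repeating_part (n : Int) (d : Int) (B : Int) : List Int :=
  let n := if n > d then PySem.Int.mod n d * B else n
  repeating_part_loop d B (d.natAbs + 2) n [] []

-- ===== PORT B =====
-- Source B's step(x) = x % d * B
def rp_step (d B x : Int) : Int := PySem.Int.mod x d * B

-- Phase 1: while slow != fast: slow = step(slow); fast = step(step(fast))
def rp_meet (d B : Int) : Nat → Int → Int → Int
  | 0, slow, _ => slow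
  | fuel + 1, slow, fast =>
    if slow = fast then slow
    else rp_meet d B fuel (rp_step d B slow) (rp_step d B (rp_step d B fast))

-- Phase 2: while start != slow: start = step(start); slow = step(slow)
def rp_start (d B : Int) : Nat → Int → Int → Int
  | 0, start, _ => start
  | fuel + 1, start, slow =>
    if start = slow then start
    else rp_start d B fuel (rp_step d B start) (rp_step d B slow)

-- Phase 3: while r != start: digits.append(r // d); r = step(r)
def rp_emit (d B : Int) : Nat → Int → Int → List Int → List Int
  | 0, _, _, digits => digits
  | fuel + 1, start, r, digits =>
    if r = start then digits
    else rp_emit d B fuel start (rp_step d B r) (digits ++ [PySem.Int.floordiv r d])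

def repeating_part_alt (n : Int) (d : Int) (B : Int) : List Int :=
  let n := if n > d then PySem.Int.mod n d * B else n
  let fuel := d.natAbs + 2
  let slow := rp_meet d B fuel (rp_step d B n) (rp_step d B (rp_step d B n))
  let start := rp_start d B fuel n slow
  rp_emit d B fuel start (rp_step d B start) [PySem.Int.floordiv start d]

-- ===== PRECONDITION & SPEC =====
-- Pre_ excludes exactly d = 0, where Python's divmod (A) / '%' (B) raises ZeroDivisionError.
def Pre_repeating_part (n : Int) (d : Int) (B : Int) : Prop := d ≠ 0
instance (n : Int) (d : Int) (B : Int) : Decidable (Pre_repeating_part n d B) := by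
  unfold Pre_repeating_part; infer_instance
def pvWitness_repeating_part : Int × Int × Int := (1, 7, 10)

def Spec_repeating_part (n : Int) (d : Int) (B : Int) (out : List Int) : Prop := out = repeating_part_alt n d B
instance (n : Int) (d : Int) (B : Int) (out : List Int) : Decidable (Spec_repeating_part n d B out) := by unfold Spec_repeating_part; infer_instance

-- ===== CLAIM (what is proved, stated in full; the proofs are below) =====
def Claim_equal_repeating_part : Prop := ∀ (n : Int) (d : Int) (B : Int), Dom_repeating_part n d B → Pre_repeating_part n d B → Spec_repeating_part n d B (repeating_part n d B)

-- ===== LEMMAS AND PROOFS =====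

-- The remainder sequence both programs walk: seq 0 = n0, seq (i+1) = step (seq i).
def rp_seq (d B n0 : Int) : Nat → Int
  | 0 => n0
  | i + 1 => rp_step d B (rp_seq d B n0 i)

-- digit emitted at position i
def rp_dig (d B n0 : Int) (i : Nat) : Int := PySem.Int.floordiv (rp_seq d B n0 i) d

-- Pigeonhole: some remainder repeats within d.natAbs + 1 steps.
lemma rp_exists_rep (d B n0 : Int) (hd : d ≠ 0) :
    ∃ j, j ≤ d.natAbs + 1 ∧ ∃ i, i < j ∧ rp_seq d B n0 i = rp_seq d B n0 j := by
  classical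
  set S : Finset Int :=
    (if 0 < d then Finset.Ico 0 d else Finset.Ico (d + 1) 1).image (fun r => r * B) with hS
  have hmaps : ∀ i ∈ Finset.range (d.natAbs + 1), rp_seq d B n0 (i + 1) ∈ S := by
    intro i _
    have : rp_seq d B n0 (i + 1) = PySem.Int.mod (rp_seq d B n0 i) d * B := rfl
    rw [this, hS]
    apply Finset.mem_image.mpr
    refine ⟨PySem.Int.mod (rp_seq d B n0 i) d, ?_, rfl⟩
    by_cases hdp : 0 < d
    · rw [if_pos hdp, Finset.mem_Ico]
      exact ⟨PySem.Int.mod_nonneg _ hdp, PySem.Int.mod_lt _ hdp⟩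
    · have hdn : d < 0 := by omega
      have hb := PySem.Int.mod_neg_bounds (a := rp_seq d B n0 i) hdn
      rw [if_neg hdp, Finset.mem_Ico]
      omega
  have hcard : S.card < (Finset.range (d.natAbs + 1)).card := by
    have h1 : S.card ≤ d.natAbs := by
      rw [hS]
      refine le_trans (Finset.card_image_le) ?_
      by_cases hdp : 0 < d
      · rw [if_pos hdp, Int.card_Ico]; omega
      · rw [if_neg hdp, Int.card_Ico]; omega
    rw [Finset.card_range]; omega
  obtain ⟨i, hi, j, hj, hne, heq⟩ :=
    Finset.exists_ne_map_eq_of_card_lt_of_maps_to hcard hmaps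
  rw [Finset.mem_range] at hi hj
  rcases Nat.lt_or_ge i j with h | h
  · exact ⟨j + 1, by omega, i + 1, by omega, heq⟩
  · have h' : j < i := by omega
    exact ⟨i + 1, by omega, j + 1, by omega, heq.symm⟩

-- A's loop, characterized: starting at step k with the accumulated digit/remainder lists,
-- it returns the digits of indices [mu, mu+lam).
lemma rp_A_loop (d B n0 : Int) (stop mu lam : Nat)
    (hstop : stop = mu + lam) (hlam : 0 < lam)
    (hrep : rp_seq d B n0 mu = rp_seq d B n0 stop)
    (hinj : ∀ i j : Nat, i < j → j < stop → rp_seq d B n0 i ≠ rp_seq d B n0 j)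
    (hmumin : ∀ i : Nat, i < mu → rp_seq d B n0 i ≠ rp_seq d B n0 stop) :
    ∀ (fuel k : Nat), k ≤ stop → stop < k + fuel →
      repeating_part_loop d B fuel (rp_seq d B n0 k)
        ((List.range k).map (rp_dig d B n0))
        ((List.range k).map (rp_seq d B n0))
      = (List.range' mu lam).map (rp_dig d B n0) := by
  have hmu : mu < stop := by omega
  intro fuel
  induction fuel with
  | zero => intro k hk hlt; omega
  | succ fu ih =>
    intro k hk hlt
    by_cases hks : k = stop
    · rw [hks]
      rw [repeating_part_loop]
      have hmem : rp_seq d B n0 stop ∈ (List.range stop).map (rp_seq d B n0) :=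
        List.mem_map.mpr ⟨mu, List.mem_range.mpr hmu, hrep⟩
      have hc : ((List.range stop).map (rp_seq d B n0)).contains (rp_seq d B n0 stop) = true := by
        rw [List.contains_iff_mem]; exact hmem
      rw [hc]
      simp only [if_true]
      -- the first index of seq stop among the remainders is mu
      have hsplit : (List.range stop).map (rp_seq d B n0)
          = (List.range' 0 mu).map (rp_seq d B n0)
            ++ rp_seq d B n0 stop :: (List.range' (mu + 1) (lam - 1)).map (rp_seq d B n0) := by
        have h1 : List.range stop = List.range' 0 mu ++ List.range' mu lam := by
          rw [List.range_eq_range']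
          have := List.range'_append (s := 0) (m := mu) (n := lam) (step := 1)
          simp only [Nat.one_mul, Nat.zero_add] at this
          rw [← hstop] at this
          exact this.symm
        have h2 : List.range' mu lam = mu :: List.range' (mu + 1) (lam - 1) := by
          have hlam : lam = (lam - 1) + 1 := by omega
          rw [hlam]
          exact List.range'_succ
        rw [h1, h2, List.map_append, List.map_cons]
        rw [show rp_seq d B n0 mu = rp_seq d B n0 stop from hrep]
      have hidx : PySem.List.index? ((List.range stop).map (rp_seq d B n0)) (rp_seq d B n0 stop)
          = some mu := by
        rw [PySem.List.index?_eq_some_iff]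
        refine ⟨(List.range' 0 mu).map (rp_seq d B n0),
                (List.range' (mu + 1) (lam - 1)).map (rp_seq d B n0), hsplit, by simp, ?_⟩
        intro hmem'
        obtain ⟨i, hi, he⟩ := List.mem_map.mp hmem'
        rw [List.mem_range'] at hi
        exact hmumin i (by omega) he
      rw [hidx]
      simp only [Option.getD_some]
      -- digits.drop mu
      have hdsplit : (List.range stop).map (rp_dig d B n0)
          = (List.range' 0 mu).map (rp_dig d B n0) ++ (List.range' mu lam).map (rp_dig d B n0) := by
        rw [List.range_eq_range']
        have := List.range'_append (s := 0) (m := mu) (n := lam) (step := 1)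
        simp only [Nat.one_mul, Nat.zero_add] at this
        rw [← hstop] at this
        rw [← this, List.map_append]
      rw [hdsplit]
      have hlen : ((List.range' 0 mu).map (rp_dig d B n0)).length = mu := by simp
      have hdl := List.drop_left (l₁ := (List.range' 0 mu).map (rp_dig d B n0))
        (l₂ := (List.range' mu lam).map (rp_dig d B n0))
      rw [hlen] at hdl
      exact hdl
    · have hklt : k < stop := lt_of_le_of_ne hk hks
      rw [repeating_part_loop]
      have hnm : rp_seq d B n0 k ∉ (List.range k).map (rp_seq d B n0) := by
        intro hmem
        obtain ⟨i, hi, he⟩ := List.mem_map.mp hmem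
        exact hinj i k (List.mem_range.mp hi) hklt he
      have hc : ((List.range k).map (rp_seq d B n0)).contains (rp_seq d B n0 k) = false := by
        simpa using hnm
      rw [hc]
      simp only [Bool.false_eq_true, if_false]
      have hd1 : (List.range k).map (rp_dig d B n0) ++ [PySem.Int.floordiv (rp_seq d B n0 k) d]
          = (List.range (k + 1)).map (rp_dig d B n0) := by
        rw [List.range_succ, List.map_append]; rfl
      have hr1 : (List.range k).map (rp_seq d B n0) ++ [rp_seq d B n0 k]
          = (List.range (k + 1)).map (rp_seq d B n0) := by
        rw [List.range_succ, List.map_append]; rfl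
      have hn1 : PySem.Int.mod (rp_seq d B n0 k) d * B = rp_seq d B n0 (k + 1) := rfl
      rw [hd1, hr1, hn1]
      exact ih (k + 1) (by omega) (by omega)

-- Phase 1 characterized: with m the first index ≥ 1 with seq m = seq (2m),
-- the meet loop started at (seq k, seq 2k) returns seq m.
lemma rp_meet_char (d B n0 : Int) (m : Nat)
    (hmeet : rp_seq d B n0 m = rp_seq d B n0 (2 * m))
    (hmin : ∀ i, 1 ≤ i → i < m → rp_seq d B n0 i ≠ rp_seq d B n0 (2 * i)) :
    ∀ (fuel k : Nat), 1 ≤ k → k ≤ m → m < k + fuel →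
      rp_meet d B fuel (rp_seq d B n0 k) (rp_seq d B n0 (2 * k)) = rp_seq d B n0 m := by
  intro fuel
  induction fuel with
  | zero => intro k _ _ _; omega
  | succ fu ih =>
    intro k hk1 hkm hlt
    by_cases hks : k = m
    · subst hks
      rw [rp_meet, if_pos hmeet]
    · have hklt : k < m := lt_of_le_of_ne hkm hks
      rw [rp_meet, if_neg (hmin k hk1 hklt)]
      have h1 : rp_step d B (rp_seq d B n0 k) = rp_seq d B n0 (k + 1) := rfl
      have h2 : rp_step d B (rp_step d B (rp_seq d B n0 (2 * k))) = rp_seq d B n0 (2 * (k + 1)) := by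
        rw [show 2 * (k + 1) = 2 * k + 1 + 1 by omega]; rfl
      rw [h1, h2]
      exact ih (k + 1) (by omega) (by omega) (by omega)

-- Phase 2 characterized: with mu the first index with seq mu = seq (mu + m),
-- the start loop started at (seq k, seq (k + m)) returns seq mu.
lemma rp_start_char (d B n0 : Int) (m mu : Nat)
    (hmu : rp_seq d B n0 mu = rp_seq d B n0 (mu + m))
    (hmin : ∀ c, c < mu → rp_seq d B n0 c ≠ rp_seq d B n0 (c + m)) :
    ∀ (fuel k : Nat), k ≤ mu → mu < k + fuel →
      rp_start d B fuel (rp_seq d B n0 k) (rp_seq d B n0 (k + m)) = rp_seq d B n0 mu := by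
  intro fuel
  induction fuel with
  | zero => intro k _ _; omega
  | succ fu ih =>
    intro k hkm hlt
    by_cases hks : k = mu
    · subst hks
      rw [rp_start, if_pos hmu]
    · have hklt : k < mu := lt_of_le_of_ne hkm hks
      rw [rp_start, if_neg (hmin k hklt)]
      have h1 : rp_step d B (rp_seq d B n0 k) = rp_seq d B n0 (k + 1) := rfl
      have h2 : rp_step d B (rp_seq d B n0 (k + m)) = rp_seq d B n0 (k + 1 + m) := by
        rw [show k + 1 + m = k + m + 1 by omega]; rfl
      rw [h1, h2]
      exact ih (k + 1) (by omega) (by omega)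

-- Phase 3 characterized: emits the digits of one full cycle [mu, mu + lam).
lemma rp_emit_char (d B n0 : Int) (mu lam : Nat)
    (hcyc : rp_seq d B n0 (mu + lam) = rp_seq d B n0 mu)
    (hmin : ∀ t, 1 ≤ t → t < lam → rp_seq d B n0 (mu + t) ≠ rp_seq d B n0 mu) :
    ∀ (fuel t : Nat), 1 ≤ t → t ≤ lam → lam < t + fuel →
      rp_emit d B fuel (rp_seq d B n0 mu) (rp_seq d B n0 (mu + t))
        ((List.range' mu t).map (rp_dig d B n0))
      = (List.range' mu lam).map (rp_dig d B n0) := by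
  intro fuel
  induction fuel with
  | zero => intro t _ _ _; omega
  | succ fu ih =>
    intro t ht1 htl hlt
    by_cases hts : t = lam
    · subst hts
      rw [rp_emit, if_pos hcyc]
    · have htlt : t < lam := lt_of_le_of_ne htl hts
      rw [rp_emit, if_neg (hmin t ht1 htlt)]
      have h1 : rp_step d B (rp_seq d B n0 (mu + t)) = rp_seq d B n0 (mu + (t + 1)) := by
        rw [show mu + (t + 1) = mu + t + 1 by omega]; rfl
      have h2 : (List.range' mu t).map (rp_dig d B n0) ++ [PySem.Int.floordiv (rp_seq d B n0 (mu + t)) d]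
          = (List.range' mu (t + 1)).map (rp_dig d B n0) := by
        have := List.range'_concat (s := mu) (n := t) (step := 1)
        simp only [Nat.one_mul] at this
        rw [this, List.map_append]; rfl
      rw [h1, h2]
      exact ih (t + 1) (by omega) (by omega) (by omega)

-- The core equivalence for an arbitrary start value n0 (and d ≠ 0).
lemma rp_core (d B n0 : Int) (hd : d ≠ 0) :
    repeating_part_loop d B (d.natAbs + 2) n0 [] []
    = rp_emit d B (d.natAbs + 2)
        (rp_start d B (d.natAbs + 2) n0
          (rp_meet d B (d.natAbs + 2) (rp_step d B n0) (rp_step d B (rp_step d B n0))))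
        (rp_step d B
          (rp_start d B (d.natAbs + 2) n0
            (rp_meet d B (d.natAbs + 2) (rp_step d B n0) (rp_step d B (rp_step d B n0)))))
        [PySem.Int.floordiv
          (rp_start d B (d.natAbs + 2) n0
            (rp_meet d B (d.natAbs + 2) (rp_step d B n0) (rp_step d B (rp_step d B n0)))) d] := by
  classical
  set seq := rp_seq d B n0 with hseq
  -- the first repeated index stop, its earlier partner mu, cycle length lam
  obtain ⟨jb, hjb, hjex⟩ := rp_exists_rep d B n0 hd
  have hex : ∃ j, ∃ i, i < j ∧ seq i = seq j := ⟨jb, hjex⟩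
  set stop := Nat.find hex with hstopdef
  have hstopspec : ∃ i, i < stop ∧ seq i = seq stop := Nat.find_spec hex
  have hstople : stop ≤ d.natAbs + 1 := le_trans (Nat.find_min' hex hjex) hjb
  have hinj : ∀ i j : Nat, i < j → j < stop → seq i ≠ seq j := by
    intro i j hij hj he
    exact Nat.find_min hex hj ⟨i, hij, he⟩
  set mu := Nat.find hstopspec with hmudef
  obtain ⟨hmult, hrep⟩ : mu < stop ∧ seq mu = seq stop := Nat.find_spec hstopspec
  have hmumin : ∀ i, i < mu → seq i ≠ seq stop := by
    intro i hi he
    exact Nat.find_min hstopspec hi ⟨by omega, he⟩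
  set lam := stop - mu with hlamdef
  have hstop : stop = mu + lam := by omega
  have hlam : 0 < lam := by omega
  -- periodicity from mu on, with period lam
  have hper : ∀ k, mu ≤ k → seq (k + lam) = seq k := by
    intro k hk
    induction k, hk using Nat.le_induction with
    | base => rw [show mu + lam = stop from hstop.symm]; exact hrep.symm
    | succ k hk ihk =>
      have : seq (k + 1 + lam) = rp_step d B (seq (k + lam)) := by
        rw [show k + 1 + lam = (k + lam) + 1 by omega]; rfl
      rw [this, ihk]; rfl
  have hpermul : ∀ (t k : Nat), mu ≤ k → seq (k + t * lam) = seq k := by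
    intro t
    induction t with
    | zero => intro k _; simp
    | succ s ihs =>
      intro k hk
      rw [show k + (s + 1) * lam = (k + s * lam) + lam by ring]
      rw [hper _ (by omega), ihs k hk]
  have hnorm : ∀ k, mu ≤ k → seq k = seq (mu + (k - mu) % lam) := by
    intro k hk
    have hdm := Nat.div_add_mod (k - mu) lam
    have hk2 : k = (mu + (k - mu) % lam) + ((k - mu) / lam) * lam := by
      rw [Nat.mul_comm]; omega
    conv_lhs => rw [hk2]
    exact hpermul _ _ (by omega)
  have hnormlt : ∀ k, mu + (k - mu) % lam < stop := by
    intro k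
    have := Nat.mod_lt (k - mu) hlam
    omega
  -- any Floyd meeting index i ≥ 1 satisfies mu ≤ i and lam ∣ i
  have hmeetprop : ∀ i, 1 ≤ i → seq i = seq (2 * i) → mu ≤ i ∧ i % lam = 0 := by
    intro i hi1 he
    have hmui : mu ≤ i := by
      by_contra hlt
      by_cases h2i : 2 * i < stop
      · exact hinj i (2 * i) (by omega) h2i he
      · have h2ge : mu ≤ 2 * i := by omega
        have hu := hnorm (2 * i) h2ge
        have hul := hnormlt (2 * i)
        by_cases hiu : i = mu + (2 * i - mu) % lam
        · omega
        · have hilt : i < mu + (2 * i - mu) % lam := by omega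
          exact hinj i _ hilt hul (he.trans hu)
    have h2ge : mu ≤ 2 * i := by omega
    have h1 := hnorm i hmui
    have h2 := hnorm (2 * i) h2ge
    have heq2 : seq (mu + (i - mu) % lam) = seq (mu + (2 * i - mu) % lam) := by
      rw [← h1, ← h2]; exact he
    have hmeq : (i - mu) % lam = (2 * i - mu) % lam := by
      by_contra hne
      rcases Nat.lt_or_ge ((i - mu) % lam) ((2 * i - mu) % lam) with h | h
      · exact hinj _ _ (by omega) (hnormlt (2 * i)) heq2
      · exact hinj _ _ (by omega) (hnormlt i) heq2.symm
    -- (i - mu) ≡ (2i - mu) (mod lam)  ⇒  lam ∣ i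
    have h2i : 2 * i - mu = (i - mu) + i := by omega
    rw [h2i, Nat.add_mod] at hmeq
    have hmlt1 := Nat.mod_lt (i - mu) hlam
    have hmlt2 := Nat.mod_lt i hlam
    have := Nat.mod_lt ((i - mu) % lam + i % lam) hlam
    rcases Nat.lt_or_ge ((i - mu) % lam + i % lam) lam with hc | hc
    · rw [Nat.mod_eq_of_lt hc] at hmeq
      omega
    · have hsub : ((i - mu) % lam + i % lam) % lam = (i - mu) % lam + i % lam - lam := by
        rw [Nat.mod_eq_sub_mod hc, Nat.mod_eq_of_lt (by omega)]
      omega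
  -- a meeting index exists: i0 = lam * (mu / lam + 1)
  have hdm := Nat.div_add_mod mu lam
  have hmlt := Nat.mod_lt mu hlam
  set i0 := lam * (mu / lam + 1) with hi0def
  have hi0eq : i0 = lam * (mu / lam) + lam := by rw [hi0def]; ring
  have hge : mu ≤ i0 := by omega
  have h1le : 1 ≤ i0 := by omega
  have hi0le : i0 ≤ stop := by omega
  have hi0meet : seq i0 = seq (2 * i0) := by
    rw [show 2 * i0 = i0 + (mu / lam + 1) * lam by rw [hi0def]; ring]
    exact (hpermul _ _ hge).symm
  have hmex : ∃ i, 1 ≤ i ∧ seq i = seq (2 * i) := ⟨i0, h1le, hi0meet⟩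
  set m := Nat.find hmex with hmdef
  obtain ⟨hm1, hmeet⟩ : 1 ≤ m ∧ seq m = seq (2 * m) := Nat.find_spec hmex
  have hmmin : ∀ i, 1 ≤ i → i < m → seq i ≠ seq (2 * i) := by
    intro i hi1 hi he
    exact Nat.find_min hmex hi ⟨hi1, he⟩
  have hmle : m ≤ stop := le_trans (Nat.find_min' hmex ⟨h1le, hi0meet⟩) hi0le
  obtain ⟨hmum, hmlam⟩ := hmeetprop m hm1 hmeet
  -- phase 2 hypotheses with offset m
  have hstart_eq : seq mu = seq (mu + m) := by
    have hdm2 := Nat.div_add_mod m lam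
    have hmm : lam * (m / lam) = m := by omega
    rw [show mu + m = mu + (m / lam) * lam by rw [Nat.mul_comm, hmm]]
    exact (hpermul _ _ (le_refl mu)).symm
  have hstart_min : ∀ c, c < mu → seq c ≠ seq (c + m) := by
    intro c hc he
    have hgem : mu ≤ c + m := by omega
    have hu := hnorm (c + m) hgem
    have hul := hnormlt (c + m)
    have hclt : c < mu + (c + m - mu) % lam := by omega
    exact hinj c _ hclt hul (he.trans hu)
  -- phase 3 hypotheses
  have hcyc : seq (mu + lam) = seq mu := hper mu (le_refl mu)
  have hemit_min : ∀ t, 1 ≤ t → t < lam → seq (mu + t) ≠ seq mu := by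
    intro t ht1 htl he
    exact hinj mu (mu + t) (by omega) (by omega) he.symm
  -- assemble
  have hfuel : stop < d.natAbs + 2 := by omega
  have hmeetv : rp_meet d B (d.natAbs + 2) (rp_step d B n0) (rp_step d B (rp_step d B n0))
      = seq m := by
    have h1 : rp_step d B n0 = seq 1 := rfl
    have h2 : rp_step d B (rp_step d B n0) = seq (2 * 1) := rfl
    rw [h2, h1]
    exact rp_meet_char d B n0 m hmeet hmmin (d.natAbs + 2) 1 (by omega) hm1 (by omega)
  have hstartv : rp_start d B (d.natAbs + 2) n0 (seq m) = seq mu := by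
    have h0 : n0 = seq 0 := rfl
    have h1 : seq m = seq (0 + m) := by rw [Nat.zero_add]
    rw [h0, h1]
    exact rp_start_char d B n0 m mu hstart_eq hstart_min (d.natAbs + 2) 0 (by omega) (by omega)
  rw [hmeetv, hstartv]
  have hstep1 : rp_step d B (seq mu) = seq (mu + 1) := rfl
  have hacc : [PySem.Int.floordiv (seq mu) d] = (List.range' mu 1).map (rp_dig d B n0) := by
    simp [List.range'_one, rp_dig, hseq]
  rw [hstep1, hacc]
  have hB := rp_emit_char d B n0 mu lam hcyc hemit_min (d.natAbs + 2) 1 (by omega) (by omega) (by omega)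
  rw [hB]
  have hA := rp_A_loop d B n0 stop mu lam hstop hlam hrep hinj hmumin (d.natAbs + 2) 0 (by omega) (by omega)
  simpa using hA

theorem rp_eq (n d B : Int) (hd : d ≠ 0) :
    repeating_part n d B = repeating_part_alt n d B := by
  unfold repeating_part repeating_part_alt
  exact rp_core d B (if n > d then PySem.Int.mod n d * B else n) hd

-- ===== VERDICT (by name: the statement is the Claim_ definition above) =====
theorem repeating_part_spec : Claim_equal_repeating_part := by
  intro n d B _ hpre
  unfold Spec_repeating_part
  exact rp_eq n d B hpre
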